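-- pv_equiv track=rewrite | github.com/serenaklm/ML_MS_analysis | FP_prediction/baseline_models/utils/data_utils.py | formula_dict_to_str
-- ===== SOURCE A (Python) =====
-- def formula_dict_to_str(formula_dict):
--
--     def hill_sort_key(element):
--         if element == "C":
--             return (0, element)
--         elif element == "H":
--             return (1, element)
--         else:
--             return (2, element)
--
--     # Filter out elements that have zero or negative counts (just in case)
--     cleaned = {el: cnt for el, cnt in formula_dict.items() if cnt > 0}
--
--     # Sort elements according to the partial Hill order
--     sorted_elements = sorted(cleaned.keys(), key=hill_sort_key)
--
--     # Build output string
--     output_str = ""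
--     for el in sorted_elements:
--         cnt = cleaned[el]
--         if cnt == 1:
--             output_str += f"{el}"
--         else:
--             output_str += f"{el}{cnt}"
--     return output_str
-- ===== SOURCE B (Python) =====
-- def formula_dict_to_str(formula_dict):
--     # Partition the positive-count entries into the three Hill groups
--     # (C, H, everything else alphabetical) instead of one composite-key sort.
--     cleaned = [(el, cnt) for el, cnt in formula_dict.items() if cnt > 0]
--     carbon = [p for p in cleaned if p[0] == "C"]
--     hydrogen = [p for p in cleaned if p[0] == "H"]
--     others = sorted((p for p in cleaned if p[0] != "C" and p[0] != "H"),
--                     key=lambda p: p[0])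
--     return "".join(el if cnt == 1 else f"{el}{cnt}"
--                    for el, cnt in carbon + hydrogen + others)
-- ===== Notes on version B (the rewrite author's own statement) =====
-- stated objective: alternative
-- what changed: Replaces A's dict rebuild plus single sorted() with a composite hill_sort_key and per-key dict lookups by a direct partition of the positive-count items into the three Hill groups (C, H, alphabetically sorted others) joined in one pass over the pairs.
import Mathlib
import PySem

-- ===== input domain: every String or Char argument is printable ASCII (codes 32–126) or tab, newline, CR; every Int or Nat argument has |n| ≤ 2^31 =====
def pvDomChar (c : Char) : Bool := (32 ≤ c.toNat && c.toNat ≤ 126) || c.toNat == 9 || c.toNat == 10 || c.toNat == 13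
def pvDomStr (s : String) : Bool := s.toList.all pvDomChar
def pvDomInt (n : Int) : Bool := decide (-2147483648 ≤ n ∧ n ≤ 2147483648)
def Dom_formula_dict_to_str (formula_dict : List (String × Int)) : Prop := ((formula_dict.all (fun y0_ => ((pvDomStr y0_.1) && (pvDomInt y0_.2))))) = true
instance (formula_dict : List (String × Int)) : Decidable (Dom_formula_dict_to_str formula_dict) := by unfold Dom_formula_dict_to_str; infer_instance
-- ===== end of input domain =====

-- B replaces A's composite-key sort over a rebuilt dict by a direct partition of the positive-count
-- items into the three Hill groups (C, H, alphabetically sorted others), joined in one pass (alternative decomposition, same cost).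

-- ===== PORT A =====
def formula_dict_to_str (formula_dict : List (String × Int)) : String :=
  -- cleaned = {el: cnt for el, cnt in formula_dict.items() if cnt > 0}
  let cleaned : PySem.Dict String Int :=
    formula_dict.foldl (fun d p => if p.2 > 0 then d.insert p.1 p.2 else d) PySem.Dict.empty
  -- sorted_elements = sorted(cleaned.keys(), key=hill_sort_key)
  let sorted_elements : List String :=
    PySem.List.sorted2 cleaned.keys
      (fun el => if el == "C" then (0 : Int) else if el == "H" then (1 : Int) else (2 : Int))
      (fun el => el) false
  -- output_str accumulation loop
  let out : List Char :=
    sorted_elements.foldl (fun acc el =>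
      let cnt := cleaned.getD el 0
      if cnt == 1 then acc ++ el.toList else acc ++ el.toList ++ PySem.Int.toChars cnt) []
  String.ofList out


-- ===== PORT B =====
-- fmt(el, cnt): `el` when cnt == 1, else `el{cnt}`
def pvFmt (p : String × Int) : List Char :=
  if p.2 == 1 then p.1.toList else p.1.toList ++ PySem.Int.toChars p.2

def formula_dict_to_str_alt (formula_dict : List (String × Int)) : String :=
  let cleaned := formula_dict.filter (fun p => decide (p.2 > 0))
  let carbon := cleaned.filter (fun p => p.1 == "C")
  let hydrogen := cleaned.filter (fun p => p.1 == "H")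
  let others := PySem.List.sorted (cleaned.filter (fun p => p.1 != "C" && p.1 != "H"))
      (fun p => p.1) false
  String.ofList ((carbon ++ hydrogen ++ others).flatMap pvFmt)


-- ===== PRECONDITION & SPEC =====
-- Pre_ excludes association lists with duplicate keys: the input models a Python dict,
-- which cannot carry duplicate keys, and the two ports resolve such lists differently.
def Pre_formula_dict_to_str (formula_dict : List (String × Int)) : Prop :=
  (formula_dict.map Prod.fst).Nodup
instance (formula_dict : List (String × Int)) : Decidable (Pre_formula_dict_to_str formula_dict) := by
  unfold Pre_formula_dict_to_str; infer_instance
def pvWitness_formula_dict_to_str : (List (String × Int)) := [("C", 6), ("H", 12), ("O", 6)]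

def Spec_formula_dict_to_str (formula_dict : List (String × Int)) (out : String) : Prop := out = formula_dict_to_str_alt formula_dict
instance (formula_dict : List (String × Int)) (out : String) : Decidable (Spec_formula_dict_to_str formula_dict out) := by unfold Spec_formula_dict_to_str; infer_instance

-- ===== CLAIM (what is proved, stated in full; the proofs are below) =====
def Claim_equal_formula_dict_to_str : Prop := ∀ (formula_dict : List (String × Int)), Dom_formula_dict_to_str formula_dict → Pre_formula_dict_to_str formula_dict → Spec_formula_dict_to_str formula_dict (formula_dict_to_str formula_dict)

-- ===== LEMMAS AND PROOFS =====

def pvRank (el : String) : Int :=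
  if el == "C" then (0 : Int) else if el == "H" then (1 : Int) else (2 : Int)
def pvKey (el : String) : String :=
  String.ofList ((if el == "C" then '0' else if el == "H" then '1' else '2') :: el.toList)
theorem pvKey_lt_iff (a b : String) :
    pvKey a < pvKey b ↔ (pvRank a < pvRank b ∨ (pvRank a = pvRank b ∧ a < b)) := by
  unfold pvKey pvRank
  rw [String.lt_iff_toList_lt]
  simp only [String.toList_ofList, List.cons_lt_cons_iff, ← String.lt_iff_toList_lt]
  by_cases hac : a == "C" <;> by_cases hah : a == "H" <;>
    by_cases hbc : b == "C" <;> by_cases hbh : b == "H" <;> simp_all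

theorem pv_sorted2_eq (xs : List String) :
    PySem.List.sorted2 xs
      (fun el => if el == "C" then (0 : Int) else if el == "H" then (1 : Int) else (2 : Int))
      (fun el => el) false
      = PySem.List.sorted xs pvKey false := by
  rw [PySem.List.sorted_eq_foldl_insertBy]
  simp only [PySem.List.sorted2, if_neg (by decide : ¬ (false = true))]
  congr 1
  funext acc x
  congr 1
  funext a b
  have : ((if a == "C" then (0:Int) else if a == "H" then 1 else 2) < (if b == "C" then (0:Int) else if b == "H" then 1 else 2)
          ∨ (¬ (if b == "C" then (0:Int) else if b == "H" then 1 else 2) < (if a == "C" then (0:Int) else if a == "H" then 1 else 2) ∧ a < b))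
        ↔ pvKey a < pvKey b := by
    rw [pvKey_lt_iff]
    unfold pvRank
    constructor
    · rintro (h | ⟨h1, h2⟩)
      · exact Or.inl h
      · rcases lt_trichotomy (if a == "C" then (0:Int) else if a == "H" then 1 else 2)
          ((if b == "C" then (0:Int) else if b == "H" then 1 else 2)) with h | h | h
        · exact Or.inl h
        · exact Or.inr ⟨h, h2⟩
        · exact absurd h h1
    · rintro (h | ⟨h1, h2⟩)
      · exact Or.inl h
      · exact Or.inr ⟨by omega, h2⟩
  simp only [← decide_not, ← Bool.decide_and, ← Bool.decide_or]
  exact decide_eq_decide.mpr this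

theorem pv_pairwise_const {l : List String} {c : String} (hc : ∀ x ∈ l, x = c)
    (hnd : l.Nodup) (R : String → String → Prop) : l.Pairwise R := by
  match l with
  | [] => exact List.Pairwise.nil
  | [x] => exact List.pairwise_singleton R x
  | x :: y :: t =>
    exfalso
    have hx := hc x (by simp)
    have hy := hc y (by simp)
    simp [hx, hy] at hnd

-- the three-group concatenation B builds, as pairs
def pvPairs (formula_dict : List (String × Int)) : List (String × Int) :=
  let cleaned := formula_dict.filter (fun p => decide (p.2 > 0))
  cleaned.filter (fun p => p.1 == "C") ++ cleaned.filter (fun p => p.1 == "H") ++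
    PySem.List.sorted (cleaned.filter (fun p => p.1 != "C" && p.1 != "H")) (fun p => p.1) false

theorem pvPairs_sublist_mem {formula_dict : List (String × Int)} {p : String × Int}
    (h : p ∈ pvPairs formula_dict) : p ∈ formula_dict.filter (fun p => decide (p.2 > 0)) := by
  unfold pvPairs at h
  simp only [List.mem_append, PySem.List.mem_sorted] at h
  rcases h with (h | h) | h <;> exact (List.mem_filter.mp h).1

theorem pvPairs_perm (formula_dict : List (String × Int)) :
    (pvPairs formula_dict).Perm (formula_dict.filter (fun p => decide (p.2 > 0))) := by
  unfold pvPairs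
  set cleaned := formula_dict.filter (fun p => decide (p.2 > 0)) with hcl
  have h1 : (cleaned.filter (fun p => p.1 == "C") ++ cleaned.filter (fun p => !(p.1 == "C"))).Perm cleaned :=
    List.filter_append_perm _ _
  have h2 : ((cleaned.filter (fun p => !(p.1 == "C"))).filter (fun p => p.1 == "H") ++
      (cleaned.filter (fun p => !(p.1 == "C"))).filter (fun p => !(p.1 == "H"))).Perm
      (cleaned.filter (fun p => !(p.1 == "C"))) := List.filter_append_perm _ _
  have e1 : (cleaned.filter (fun p => !(p.1 == "C"))).filter (fun p => p.1 == "H")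
      = cleaned.filter (fun p => p.1 == "H") := by
    rw [List.filter_filter]
    apply List.filter_congr
    intro p _
    by_cases h : p.1 == "H" <;> simp_all
  have e2 : (cleaned.filter (fun p => !(p.1 == "C"))).filter (fun p => !(p.1 == "H"))
      = cleaned.filter (fun p => p.1 != "C" && p.1 != "H") := by
    rw [List.filter_filter]
    apply List.filter_congr
    intro p _
    simp [bne, Bool.and_comm]
  rw [List.append_assoc, ← e1, ← e2]
  refine List.Perm.trans ?_ h1
  refine List.Perm.append_left _ (List.Perm.trans ?_ h2)
  exact List.Perm.append_left _ (PySem.List.sorted_perm _ _ _)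

theorem pv_sorted_keys (formula_dict : List (String × Int))
    (hnd : ((formula_dict.filter (fun p => decide (p.2 > 0))).map Prod.fst).Nodup) :
    PySem.List.sorted ((formula_dict.filter (fun p => decide (p.2 > 0))).map Prod.fst)
      pvKey false = (pvPairs formula_dict).map Prod.fst := by
  set cleaned := formula_dict.filter (fun p => decide (p.2 > 0)) with hcl
  apply PySem.List.sorted_eq_of_perm_of_pairwise_lt
  · exact (pvPairs_perm formula_dict).map Prod.fst
  · unfold pvPairs
    rw [← hcl]
    simp only [List.map_append]
    -- facts about the three groups
    have hCmem : ∀ x ∈ (cleaned.filter (fun p => p.1 == "C")).map Prod.fst, x = "C" := by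
      intro x hx
      rcases List.mem_map.mp hx with ⟨p, hp, rfl⟩
      have := (List.mem_filter.mp hp).2
      simpa using this
    have hHmem : ∀ x ∈ (cleaned.filter (fun p => p.1 == "H")).map Prod.fst, x = "H" := by
      intro x hx
      rcases List.mem_map.mp hx with ⟨p, hp, rfl⟩
      have := (List.mem_filter.mp hp).2
      simpa using this
    have hOmem : ∀ x ∈ (PySem.List.sorted (cleaned.filter (fun p => p.1 != "C" && p.1 != "H"))
        (fun p => p.1) false).map Prod.fst, x ≠ "C" ∧ x ≠ "H" := by
      intro x hx
      rcases List.mem_map.mp hx with ⟨p, hp, rfl⟩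
      have hp2 := (PySem.List.mem_sorted _ _ _ _).mp hp
      have := (List.mem_filter.mp hp2).2
      simp only [bne, Bool.and_eq_true, Bool.not_eq_true'] at this
      exact ⟨by simpa using this.1, by simpa using this.2⟩
    have hCrank : pvRank "C" = 0 := by decide
    have hHrank : pvRank "H" = 1 := by decide
    have hOrank : ∀ x : String, x ≠ "C" → x ≠ "H" → pvRank x = 2 := by
      intro x h1 h2; unfold pvRank
      rw [if_neg (by simpa using h1), if_neg (by simpa using h2)]
    -- nodups of the groups
    have hndC : ((cleaned.filter (fun p => p.1 == "C")).map Prod.fst).Nodup :=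
      hnd.sublist (List.filter_sublist.map Prod.fst)
    have hndH : ((cleaned.filter (fun p => p.1 == "H")).map Prod.fst).Nodup :=
      hnd.sublist (List.filter_sublist.map Prod.fst)
    have hsubO : ((cleaned.filter (fun p => p.1 != "C" && p.1 != "H")).map Prod.fst).Nodup :=
      hnd.sublist (List.filter_sublist.map Prod.fst)
    have hpermO : ((PySem.List.sorted (cleaned.filter (fun p => p.1 != "C" && p.1 != "H"))
        (fun p => p.1) false).map Prod.fst).Perm
        ((cleaned.filter (fun p => p.1 != "C" && p.1 != "H")).map Prod.fst) :=
      (PySem.List.sorted_perm _ _ _).map Prod.fst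
    have hndO : ((PySem.List.sorted (cleaned.filter (fun p => p.1 != "C" && p.1 != "H"))
        (fun p => p.1) false).map Prod.fst).Nodup := hpermO.nodup_iff.mpr hsubO
    rw [List.pairwise_append, List.pairwise_append]
    refine ⟨⟨pv_pairwise_const hCmem hndC _, pv_pairwise_const hHmem hndH _, ?hch⟩, ?ho, ?hcross⟩
    case hch =>
      intro a ha b hb
      rw [pvKey_lt_iff]
      left
      rw [hCmem a ha, hHmem b hb, hCrank, hHrank]
      omega
    case hcross =>
      intro a ha b hb
      rw [pvKey_lt_iff]
      left
      have hb2 := hOrank b (hOmem b hb).1 (hOmem b hb).2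
      rcases List.mem_append.mp ha with ha | ha
      · rw [hCmem a ha, hCrank, hb2]; omega
      · rw [hHmem a ha, hHrank, hb2]; omega
    case ho =>
      have hle : ((PySem.List.sorted (cleaned.filter (fun p => p.1 != "C" && p.1 != "H"))
          (fun p => p.1) false).map Prod.fst).Pairwise (· ≤ ·) := by
        exact List.Pairwise.map _ (fun a b h => h)
          (PySem.List.sorted_pairwise _ _)
      have hne : ((PySem.List.sorted (cleaned.filter (fun p => p.1 != "C" && p.1 != "H"))
          (fun p => p.1) false).map Prod.fst).Pairwise (· ≠ ·) := hndO
      refine (hle.and hne).imp_of_mem ?_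
      intro a b ha hb h
      rw [pvKey_lt_iff]
      right
      refine ⟨?_, lt_of_le_of_ne h.1 h.2⟩
      rw [hOrank a (hOmem a ha).1 (hOmem a ha).2, hOrank b (hOmem b hb).1 (hOmem b hb).2]

-- ===== VERDICT (by name: the statement is the Claim_ definition above) =====
theorem formula_dict_to_str_spec : Claim_equal_formula_dict_to_str := by
  intro fd _ hpre
  unfold Spec_formula_dict_to_str formula_dict_to_str formula_dict_to_str_alt
  simp only []
  have hndcl : ((fd.filter (fun p => decide (p.2 > 0))).map Prod.fst).Nodup :=
    hpre.sublist (List.filter_sublist.map Prod.fst)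
  -- the dict A builds is exactly the cleaned association list
  have hdict : fd.foldl (fun d p => if p.2 > 0 then d.insert p.1 p.2 else d) PySem.Dict.empty
      = (fd.filter (fun p => decide (p.2 > 0))).foldl (fun d p => d.insert p.1 p.2) PySem.Dict.empty :=
    PySem.List.foldl_ite_eq_foldl_filter _ _ _ _
  have hitems : ((fd.filter (fun p => decide (p.2 > 0))).foldl
      (fun d p => d.insert p.1 p.2) PySem.Dict.empty).items = fd.filter (fun p => decide (p.2 > 0)) := by
    rw [PySem.Dict.items_foldl_insert_fresh (fd.filter (fun p => decide (p.2 > 0)))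
      Prod.fst Prod.snd PySem.Dict.empty
      (fun a _ => PySem.Dict.contains_empty a.1) hndcl]
    simp [PySem.Dict.empty]
  set D := (fd.filter (fun p => decide (p.2 > 0))).foldl
      (fun d p => d.insert p.1 p.2) PySem.Dict.empty with hD
  rw [hdict]
  have hkeys : D.keys = (fd.filter (fun p => decide (p.2 > 0))).map Prod.fst := by
    show D.items.map Prod.fst = _
    rw [hitems]
  rw [hkeys, pv_sorted2_eq, pv_sorted_keys fd hndcl]
  -- format loop over the key list = flatMap of pvFmt over the pair list
  rw [List.foldl_map]
  rw [PySem.List.foldl_congr_mem _ _ (fun acc p => acc ++ pvFmt p) []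
    (fun acc p hp => by
      have hmem : (p.1, p.2) ∈ D.items := by rw [hitems]; exact pvPairs_sublist_mem hp
      have hget : D.getD p.1 0 = p.2 :=
        PySem.Dict.getD_of_mem_items D hmem (by rw [hkeys]; exact hndcl) 0
      simp only [hget, pvFmt]
      split <;> simp)]
  rw [PySem.List.foldl_append_eq_flatMap]
  simp [pvPairs]
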